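-- pv_equiv track=rewrite | github.com/JGlims/JGlimsPlugin | schem_to_builder.py | _decode_varint_palette
-- ===== SOURCE A (Python) =====
-- def _decode_varint_palette(blockdata_bytes, width, height, length, palette):
--     """Decode a Sponge-schematic block array. Returns list[(x,y,z,id_str,props)]."""
--     out = []
--     # Invert palette: index -> blockstate string
--     id_to_state = {int(v): str(k) for k, v in palette.items()}
--     # Parse varints
--     i = 0
--     blocks = []
--     data = blockdata_bytes if isinstance(blockdata_bytes, (bytes, bytearray, list)) else list(blockdata_bytes)
--     # nbtlib might give us a list of ints or a ByteArray
--     data = list(data)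
--     while i < len(data):
--         value = 0
--         shift = 0
--         while True:
--             b = data[i] & 0xFF
--             i += 1
--             value |= (b & 0x7F) << shift
--             if (b & 0x80) == 0:
--                 break
--             shift += 7
--         blocks.append(value)
--
--     for index, pid in enumerate(blocks):
--         y = index // (width * length)
--         z = (index % (width * length)) // width
--         x = (index % (width * length)) % width
--         state = id_to_state.get(pid)
--         if state is None:
--             continue
--         # Parse "minecraft:name[prop=val,prop=val]"
--         if "[" in state:
--             name, propstr = state.split("[", 1)
--             propstr = propstr.rstrip("]")
--             props = {}
--             for kv in propstr.split(","):
--                 if "=" in kv: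
--                     k, v = kv.split("=", 1)
--                     props[k.strip()] = v.strip()
--         else:
--             name = state
--             props = {}
--         out.append((x, y, z, name.strip(), props))
--     return out
-- ===== SOURCE B (Python) =====
-- def _decode_varint_palette(blockdata_bytes, width, height, length, palette):
--     """Streaming decode: handle each varint the moment it completes — no intermediate
--     blocks list and no second enumeration pass."""
--     id_to_state = {}
--     for k, v in palette.items():
--         id_to_state[int(v)] = str(k)
--     out = []
--     index = 0
--     value = 0
--     shift = 0
--     for byte in list(blockdata_bytes):
--         b = byte & 0xFF
--         value |= (b & 0x7F) << shift
--         if b & 0x80: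
--             shift += 7
--             continue
--         # one varint finished: it is block number `index`
--         pid = value
--         value = 0
--         shift = 0
--         wl = width * length
--         y = index // wl
--         rem = index % wl
--         z = rem // width
--         x = rem % width
--         index += 1
--         state = id_to_state.get(pid)
--         if state is None:
--             continue
--         if "[" in state:
--             name, propstr = state.split("[", 1)
--             propstr = propstr.rstrip("]")
--             props = {}
--             for kv in propstr.split(","):
--                 if "=" in kv:
--                     k2, v2 = kv.split("=", 1)
--                     props[k2.strip()] = v2.strip()
--         else:
--             name = state
--             props = {}
--         out.append((x, y, z, name.strip(), props))
--     return out
-- ===== Notes on version B (the rewrite author's own statement) =====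
-- stated objective: alternative
-- what changed: B fuses A's two sequential phases (decode every varint into a blocks list, then enumerate that list) into one streaming loop that processes each varint the moment it completes, carrying an explicit block counter instead of enumerate.
import Mathlib
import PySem

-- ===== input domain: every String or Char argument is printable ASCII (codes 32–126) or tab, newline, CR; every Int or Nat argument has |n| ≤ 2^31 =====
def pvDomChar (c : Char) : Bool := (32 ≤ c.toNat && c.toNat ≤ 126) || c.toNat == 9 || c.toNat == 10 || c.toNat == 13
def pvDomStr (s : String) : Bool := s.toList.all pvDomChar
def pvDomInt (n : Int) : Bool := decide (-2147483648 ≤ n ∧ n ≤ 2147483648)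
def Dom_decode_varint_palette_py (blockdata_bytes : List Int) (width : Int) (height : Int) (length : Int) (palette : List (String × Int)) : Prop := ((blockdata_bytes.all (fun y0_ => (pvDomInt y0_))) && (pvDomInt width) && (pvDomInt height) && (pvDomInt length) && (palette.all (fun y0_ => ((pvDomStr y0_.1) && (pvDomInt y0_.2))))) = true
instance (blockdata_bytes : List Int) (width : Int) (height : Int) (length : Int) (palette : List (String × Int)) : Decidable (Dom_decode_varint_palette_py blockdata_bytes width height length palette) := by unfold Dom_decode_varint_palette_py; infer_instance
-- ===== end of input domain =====

-- B replaces A's two-phase decode (build the full varint list, then enumerate it in a second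
-- pass) by one streaming pass that processes each varint the moment it completes, carrying an
-- explicit block counter (objective: alternative decomposition; no intermediate blocks list).


-- ===== PORT A =====

-- hand port of s.rstrip("]"): drop every trailing ']' (exact: rstrip with an explicit char set)
def pvRstripRB (s : String) : String :=
  String.ofList ((s.toList.reverse.dropWhile (fun c => c == ']')).reverse)

-- the blockstate-string parsing block, literally shared by Source A and Source B:
-- 'minecraft:name[k=v,k=v]' -> (name.strip(), props-dict as items)
def pvParseState (state : String) : String × List (String × String) :=
  if PySem.Str.isIn "[" state then
    let parts := (PySem.Str.splitMax? state "[" 1).getD []   -- "[" ≠ "" so never none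
    let name := parts.headD ""
    let propstr := pvRstripRB ((parts.drop 1).headD "")
    let props := ((PySem.Str.split? propstr ",").getD []).foldl
      (fun (d : PySem.Dict String String) kv =>
        if PySem.Str.isIn "=" kv then
          let kvp := (PySem.Str.splitMax? kv "=" 1).getD []
          d.insert (PySem.Str.strip (kvp.headD "")) (PySem.Str.strip ((kvp.drop 1).headD ""))
        else d) PySem.Dict.empty
    (PySem.Str.strip name, props.items)
  else (PySem.Str.strip state, [])

-- A phase 1: the nested while loops reading varints into `blocks`
-- (an empty list mid-group is where Python raises IndexError; Pre_ excludes it)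
def pvVarintsA : List Int → Int → Nat → List Int
  | [], _, _ => []
  | b0 :: rest, value, shift =>
    let b := PySem.Int.band b0 255
    let value := PySem.Int.bor value (PySem.Int.band b 127 <<< shift)
    if PySem.Int.band b 128 = 0 then value :: pvVarintsA rest 0 0
    else pvVarintsA rest value (shift + 7)

def decode_varint_palette_py (blockdata_bytes : List Int) (width : Int) (height : Int) (length : Int) (palette : List (String × Int)) : List (Int × Int × Int × String × (List (String × String))) :=
  let id_to_state : PySem.Dict Int String :=
    palette.foldl (fun d p => d.insert p.2 p.1) PySem.Dict.empty
  let blocks := pvVarintsA blockdata_bytes 0 0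
  (PySem.List.enumerate blocks).foldl (fun out ip =>
    let index := ip.1
    let y := PySem.Int.floordiv index (width * length)
    let z := PySem.Int.floordiv (PySem.Int.mod index (width * length)) width
    let x := PySem.Int.mod (PySem.Int.mod index (width * length)) width
    match id_to_state.get? ip.2 with
    | none => out
    | some state => out ++ [(x, y, z, (pvParseState state).1, (pvParseState state).2)]) []

-- ===== PORT B =====

-- B's single streaming loop: state (value, shift, index); a completed varint is handled at once
def pvRunB (id_to_state : PySem.Dict Int String) (width lngth : Int) :
    List Int → Int → Nat → Int → List (Int × Int × Int × String × (List (String × String)))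
  | [], _, _, _ => []
  | byte :: rest, value, shift, index =>
    let b := PySem.Int.band byte 255
    let value' := PySem.Int.bor value (PySem.Int.band b 127 <<< shift)
    if PySem.Int.band b 128 ≠ 0 then pvRunB id_to_state width lngth rest value' (shift + 7) index
    else
      let pid := value'
      let wl := width * lngth
      let y := PySem.Int.floordiv index wl
      let rem := PySem.Int.mod index wl
      let z := PySem.Int.floordiv rem width
      let x := PySem.Int.mod rem width
      match id_to_state.get? pid with
      | none => pvRunB id_to_state width lngth rest 0 0 (index + 1)
      | some st => (x, y, z, (pvParseState st).1, (pvParseState st).2) :: pvRunB id_to_state width lngth rest 0 0 (index + 1)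

def decode_varint_palette_py_alt (blockdata_bytes : List Int) (width : Int) (height : Int) (length : Int) (palette : List (String × Int)) : List (Int × Int × Int × String × (List (String × String))) :=
  let id_to_state : PySem.Dict Int String :=
    palette.foldl (fun d p => d.insert p.2 p.1) PySem.Dict.empty
  pvRunB id_to_state width length blockdata_bytes 0 0 0

-- ===== PRECONDITION & SPEC =====
-- Pre_ excludes (a) palettes whose association-list encoding repeats a key — a Python dict
-- argument cannot contain duplicate keys, so such lists encode no real input of A — and
-- (b) inputs where Python A raises: a trailing byte with the continuation bit set
-- (IndexError in the varint loop) and, when at least one block is decoded, width = 0 or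
-- length = 0 (ZeroDivisionError in the coordinate arithmetic).
def Pre_decode_varint_palette_py (blockdata_bytes : List Int) (width : Int) (height : Int) (length : Int) (palette : List (String × Int)) : Prop :=
  (palette.map Prod.fst).Nodup ∧
  (blockdata_bytes = [] ∨
    (PySem.Int.band (blockdata_bytes.getLast!) 128 = 0 ∧ width ≠ 0 ∧ length ≠ 0))
instance (blockdata_bytes : List Int) (width : Int) (height : Int) (length : Int) (palette : List (String × Int)) : Decidable (Pre_decode_varint_palette_py blockdata_bytes width height length palette) := by unfold Pre_decode_varint_palette_py; infer_instance

def pvWitness_decode_varint_palette_py : List Int × Int × Int × Int × (List (String × Int)) :=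
  ([133, 2, 5], 2, 3, 2, [("minecraft:stone", 5), ("minecraft:oak_stairs[facing=north, half=top]", 261)])

def Spec_decode_varint_palette_py (blockdata_bytes : List Int) (width : Int) (height : Int) (length : Int) (palette : List (String × Int)) (out : List (Int × Int × Int × String × (List (String × String)))) : Prop := out = decode_varint_palette_py_alt blockdata_bytes width height length palette
instance (blockdata_bytes : List Int) (width : Int) (height : Int) (length : Int) (palette : List (String × Int)) (out : List (Int × Int × Int × String × (List (String × String)))) : Decidable (Spec_decode_varint_palette_py blockdata_bytes width height length palette out) := by unfold Spec_decode_varint_palette_py; exact @instDecidableEqList _ (fun a b => inferInstance) _ _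

-- ===== CLAIM (what is proved, stated in full; the proofs are below) =====
def Claim_equal_decode_varint_palette_py : Prop := ∀ (blockdata_bytes : List Int) (width : Int) (height : Int) (length : Int) (palette : List (String × Int)), Dom_decode_varint_palette_py blockdata_bytes width height length palette → Pre_decode_varint_palette_py blockdata_bytes width height length palette → Spec_decode_varint_palette_py blockdata_bytes width height length palette (decode_varint_palette_py blockdata_bytes width height length palette)

-- ===== LEMMAS AND PROOFS =====

-- the per-block body (proof-side normal form shared by both directions)
def pvProc (d : PySem.Dict Int String) (w l : Int) (index pid : Int) : List (Int × Int × Int × String × (List (String × String))) :=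
  match d.get? pid with
  | none => []
  | some st =>
      [(PySem.Int.mod (PySem.Int.mod index (w * l)) w,
        PySem.Int.floordiv index (w * l),
        PySem.Int.floordiv (PySem.Int.mod index (w * l)) w,
        (pvParseState st).1, (pvParseState st).2)]

def pvProcList (d : PySem.Dict Int String) (w l : Int) : List Int → Int → List (Int × Int × Int × String × (List (String × String)))
  | [], _ => []
  | pid :: rest, i => pvProc d w l i pid ++ pvProcList d w l rest (i + 1)

theorem pv_runB_eq (d : PySem.Dict Int String) (w l : Int) :
    ∀ (data : List Int) (value : Int) (shift : Nat) (index : Int),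
      pvRunB d w l data value shift index
        = pvProcList d w l (pvVarintsA data value shift) index := by
  intro data
  induction data with
  | nil => intro value shift index; rfl
  | cons b0 rest ih =>
    intro value shift index
    simp only [pvRunB, pvVarintsA]
    by_cases h : PySem.Int.band (PySem.Int.band b0 255) 128 = 0
    · simp only [h, if_pos]
      simp only [pvProcList, pvProc]
      cases d.get? (PySem.Int.bor value (PySem.Int.band (PySem.Int.band b0 255) 127 <<< shift)) with
      | none => simp [ih]
      | some st => simp [ih]
    · simp only [if_neg h, if_pos h, ih]

theorem pv_foldA_eq (d : PySem.Dict Int String) (w l : Int) :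
    ∀ (blocks : List Int) (start : Int)
      (out : List (Int × Int × Int × String × (List (String × String)))),
      (PySem.List.enumerate blocks start).foldl (fun out ip =>
        match d.get? ip.2 with
        | none => out
        | some state =>
            out ++ [(PySem.Int.mod (PySem.Int.mod ip.1 (w * l)) w,
                     PySem.Int.floordiv ip.1 (w * l),
                     PySem.Int.floordiv (PySem.Int.mod ip.1 (w * l)) w,
                     (pvParseState state).1, (pvParseState state).2)]) out
        = out ++ pvProcList d w l blocks start := by
  intro blocks
  induction blocks with
  | nil => intro start out; simp [PySem.List.enumerate, pvProcList]
  | cons pid rest ih =>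
    intro start out
    have he : PySem.List.enumerate (pid :: rest) start = (start, pid) :: PySem.List.enumerate rest (start + 1) := by
      simp [pysem]
    rw [he]
    simp only [List.foldl_cons]
    simp only [pvProcList, pvProc]
    cases d.get? pid with
    | none => rw [ih]; simp
    | some st => rw [ih]; simp

-- ===== VERDICT (by name: the statement is the Claim_ definition above) =====
theorem decode_varint_palette_py_spec : Claim_equal_decode_varint_palette_py := by
  intro blockdata_bytes width height length palette _ _
  show _ = _
  unfold decode_varint_palette_py decode_varint_palette_py_alt
  rw [pv_runB_eq]
  simpa using pv_foldA_eq (palette.foldl (fun d p => d.insert p.2 p.1) PySem.Dict.empty) width length (pvVarintsA blockdata_bytes 0 0) 0 []
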